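-- pv_equiv track=rewrite | github.com/tnnkhoa3006/DACN | DACN/Sources_code/Greedy/knight_greedy_GUI.py | greedy_knight_placement
-- ===== SOURCE A (Python) =====
-- def is_valid_move(board, row, col, n):
--     """Kiểm tra xem có thể đặt quân mã tại (row, col) không."""
--     moves = [
--         (-2, -1), (-1, -2), (1, -2), (2, -1),
--         (2, 1), (1, 2), (-1, 2), (-2, 1)
--     ]
--     for dr, dc in moves:
--         r, c = row + dr, col + dc
--         if 0 <= r < n and 0 <= c < n and board[r][c] == 1:
--             return False
--     return True
--
-- def greedy_knight_placement(n):
--     """Đặt tối đa quân mã trên bàn cờ n x n bằng thuật toán tham lam."""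
--     board = [[0] * n for _ in range(n)]  # Khởi tạo bàn cờ với giá trị 0
--     max_knights = (n * n + 1) // 2  # Số quân mã tối đa
--     placed_knights = 0  # Số quân mã đã đặt
--
--     for row in range(n):
--         for col in range(n):
--             if (row + col) % 2 == 0:  # Tham lam đặt trên ô trắng trước (ô đen cũng hợp lệ)
--                 if is_valid_move(board, row, col, n):
--                     board[row][col] = 1  # Đặt quân mã
--                     placed_knights += 1
--                     if placed_knights == max_knights:
--                         return board, placed_knights
--
--     return board, placed_knights
-- ===== SOURCE B (Python) =====
-- def greedy_knight_placement(n):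
--     """Direct construction: knights never attack same-color squares, so the
--     greedy fill is just every (row+col)-even cell; no board simulation."""
--     board = [[1 - (row + col) % 2 for col in range(n)] for row in range(n)]
--     count = (n * n + 1) // 2 if n > 0 else 0
--     return board, count
-- ===== Notes on version B (the rewrite author's own statement) =====
-- stated objective: faster
-- what changed: B drops the board simulation entirely: since a knight only attacks opposite-colour squares the validity scan is always true, so B builds each row by a direct parity formula and returns the closed-form count (n*n+1)//2 (0 for n<=0), with no is_valid_move neighbour scan and no incremental counter.
import Mathlib
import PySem

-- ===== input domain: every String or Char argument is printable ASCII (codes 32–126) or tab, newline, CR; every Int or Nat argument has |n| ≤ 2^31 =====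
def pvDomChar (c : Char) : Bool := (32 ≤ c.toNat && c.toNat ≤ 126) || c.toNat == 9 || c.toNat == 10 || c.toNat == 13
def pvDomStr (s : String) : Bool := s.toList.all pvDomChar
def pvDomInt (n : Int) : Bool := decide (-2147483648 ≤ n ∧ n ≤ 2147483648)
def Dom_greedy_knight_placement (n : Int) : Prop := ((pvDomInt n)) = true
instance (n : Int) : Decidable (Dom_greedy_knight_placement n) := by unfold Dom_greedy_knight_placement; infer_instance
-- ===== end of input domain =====

-- B replaces A's greedy board simulation (8-neighbour validity scan per cell) by a direct
-- parity fill of each row and the closed-form count (n*n+1)//2; same return value for every n.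

-- ===== PORT A =====
-- for dr, dc in moves: early `return False`
def ivm_loop (board : List (List Int)) (row col n : Int) : List (Int × Int) → Bool
  | [] => true
  | (dr, dc) :: rest =>
      let r := row + dr
      let c := col + dc
      if 0 ≤ r ∧ r < n ∧ 0 ≤ c ∧ c < n ∧
          PySem.List.pyGetD (PySem.List.pyGetD board r []) c 0 = 1 then
        false
      else
        ivm_loop board row col n rest

def is_valid_move (board : List (List Int)) (row col n : Int) : Bool :=
  ivm_loop board row col n
    [(-2, -1), (-1, -2), (1, -2), (2, -1), (2, 1), (1, 2), (-1, 2), (-2, 1)]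

-- inner `for col in range(n)` loop; `.inl` is the early `return board, placed_knights`
def gkp_inner (n maxK row : Int) :
    List Int → List (List Int) → Int → (List (List Int) × Int) ⊕ (List (List Int) × Int)
  | [], board, placed => .inr (board, placed)
  | col :: rest, board, placed =>
      if PySem.Int.mod (row + col) 2 = 0 then
        if is_valid_move board row col n then
          let board' := PySem.List.pySetD board row
            (PySem.List.pySetD (PySem.List.pyGetD board row []) col 1)
          let placed' := placed + 1
          if placed' = maxK then .inl (board', placed')
          else gkp_inner n maxK row rest board' placed'
        else gkp_inner n maxK row rest board placed
      else gkp_inner n maxK row rest board placed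

-- outer `for row in range(n)` loop
def gkp_outer (n maxK : Int) :
    List Int → List (List Int) → Int → List (List Int) × Int
  | [], board, placed => (board, placed)
  | row :: rest, board, placed =>
      match gkp_inner n maxK row (PySem.List.pyRange 0 n 1) board placed with
      | .inl res => res
      | .inr (b, p) => gkp_outer n maxK rest b p

def greedy_knight_placement (n : Int) : List (List Int) × Int :=
  let board := (PySem.List.pyRange 0 n 1).map (fun _ => List.replicate n.toNat (0 : Int))
  let maxK := PySem.Int.floordiv (n * n + 1) 2
  gkp_outer n maxK (PySem.List.pyRange 0 n 1) board 0

-- ===== PORT B =====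
def greedy_knight_placement_alt (n : Int) : List (List Int) × Int :=
  let board := (PySem.List.pyRange 0 n 1).map (fun row =>
    (PySem.List.pyRange 0 n 1).map (fun col => 1 - PySem.Int.mod (row + col) 2))
  let count := if n > 0 then PySem.Int.floordiv (n * n + 1) 2 else 0
  (board, count)

-- ===== PRECONDITION & SPEC =====
def Spec_greedy_knight_placement (n : Int) (out : List (List Int) × Int) : Prop := out = greedy_knight_placement_alt n
instance (n : Int) (out : List (List Int) × Int) : Decidable (Spec_greedy_knight_placement n out) := by unfold Spec_greedy_knight_placement; infer_instance

-- ===== CLAIM (what is proved, stated in full; the proofs are below) =====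
def Claim_equal_greedy_knight_placement : Prop := ∀ (n : Int), Dom_greedy_knight_placement n → Spec_greedy_knight_placement n (greedy_knight_placement n)


-- ===== LEMMAS AND PROOFS =====

-- value of a parity cell
def parCell (r c : Nat) : Int := if (r + c) % 2 = 0 then 1 else 0

-- row r of the board with knights placed on the first c columns (even-parity cells only)
def pRow (N r c : Nat) : List Int :=
  (List.range N).map (fun j => if j < c then parCell r j else 0)

-- board state after fully processing rows < r and columns < c of row r
def pBoard (N r c : Nat) : List (List Int) :=
  (List.range N).map (fun i =>
    if i < r then pRow N i N else if i = r then pRow N r c else List.replicate N 0)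

-- knights placed after processing rows < r and columns < c of row r
def cnt (N r c : Nat) : Nat :=
  (r * N + 1) / 2 + (if r % 2 = 0 then (c + 1) / 2 else c / 2)

lemma length_pBoard (N r c : Nat) : (pBoard N r c).length = N := by simp [pBoard]

lemma pRow_zero (N r : Nat) : pRow N r 0 = List.replicate N 0 := by
  apply List.ext_getElem <;> simp [pRow]

lemma pyGetD_pRow (N x y : Nat) (ci : Int) (h3 : 0 ≤ ci) (h4 : ci < (N : Int)) :
    PySem.List.pyGetD (pRow N x y) ci 0 = if ci.toNat < y then parCell x ci.toNat else 0 := by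
  rw [PySem.List.pyGetD_eq_getElem _ _ h3 (by simp [pRow]; omega)]
  simp [pRow]

lemma entry_pBoard_ne_one (N r c : Nat) (ri ci : Int) (h1 : 0 ≤ ri) (h2 : ri < (N : Int))
    (h3 : 0 ≤ ci) (h4 : ci < (N : Int)) (hodd : (ri + ci) % 2 ≠ 0) :
    PySem.List.pyGetD (PySem.List.pyGetD (pBoard N r c) ri []) ci 0 ≠ 1 := by
  have hri : ri.toNat < N := by omega
  have hodd' : (ri.toNat + ci.toNat) % 2 = 1 := by omega
  have hpar : ∀ x, x = ri.toNat → parCell x ci.toNat ≠ 1 := by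
    intro x hx
    subst hx
    unfold parCell
    rw [if_neg (by omega)]
    decide
  rw [PySem.List.pyGetD_eq_getElem _ _ h1 (by rw [length_pBoard]; exact_mod_cast h2)]
  simp only [pBoard, List.getElem_map, List.getElem_range]
  split_ifs with ha hb
  · rw [pyGetD_pRow _ _ _ _ h3 h4]
    split_ifs
    · exact hpar _ rfl
    · decide
  · rw [pyGetD_pRow _ _ _ _ h3 h4]
    split_ifs
    · exact hpar _ hb.symm
    · decide
  · rw [PySem.List.pyGetD_eq_getElem _ _ h3 (by simp; omega)]
    simp

lemma ivm_loop_true (board : List (List Int)) (row col n : Int) (ms : List (Int × Int))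
    (h : ∀ p ∈ ms, 0 ≤ row + p.1 → row + p.1 < n → 0 ≤ col + p.2 → col + p.2 < n →
      PySem.List.pyGetD (PySem.List.pyGetD board (row + p.1) []) (col + p.2) 0 ≠ 1) :
    ivm_loop board row col n ms = true := by
  induction ms with
  | nil => rfl
  | cons p rest ih =>
      obtain ⟨dr, dc⟩ := p
      have hp := h (dr, dc) List.mem_cons_self
      rw [ivm_loop]
      rw [if_neg (by rintro ⟨a1, a2, a3, a4, a5⟩; exact hp a1 a2 a3 a4 a5)]
      exact ih (fun p hmem => h p (List.mem_cons_of_mem _ hmem))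

lemma valid_pBoard (N r c : Nat) (hr : r < N) (hc : c < N) (hpar : (r + c) % 2 = 0) :
    is_valid_move (pBoard N r c) (r : Int) (c : Int) (N : Int) = true := by
  apply ivm_loop_true
  intro p hmem a1 a2 a3 a4
  apply entry_pBoard_ne_one N r c _ _ a1 a2 a3 a4
  fin_cases hmem <;> omega

lemma getRow_pBoard (N r c : Nat) (hr : r < N) :
    PySem.List.pyGetD (pBoard N r c) (r : Int) [] = pRow N r c := by
  rw [PySem.List.pyGetD_eq_getElem _ _ (by positivity) (by simp [length_pBoard]; exact_mod_cast hr)]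
  simp [pBoard, hr]

lemma set_pRow (N r c : Nat) (hc : c < N) (hpar : (r + c) % 2 = 0) :
    (pRow N r c).set c 1 = pRow N r (c + 1) := by
  apply List.ext_getElem (by simp [pRow])
  intro j hj1 hj2
  simp only [pRow, List.length_map, List.length_range] at hj2
  rw [List.getElem_set]
  simp only [pRow, List.getElem_map, List.getElem_range]
  rcases eq_or_ne c j with hjc | hjc
  · subst hjc
    simp [parCell, hpar]
  · rw [if_neg hjc]
    have : j < c ↔ j < c + 1 := by omega
    simp [this]

lemma set_pBoard (N r c : Nat) (hr : r < N) (hc : c < N) (hpar : (r + c) % 2 = 0) :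
    PySem.List.pySetD (pBoard N r c) (r : Int)
      (PySem.List.pySetD (PySem.List.pyGetD (pBoard N r c) (r : Int) []) (c : Int) 1)
      = pBoard N r (c + 1) := by
  rw [getRow_pBoard N r c hr, PySem.List.pySetD_of_nonneg _ _ (by positivity),
    PySem.List.pySetD_of_nonneg _ _ (by positivity), Int.toNat_natCast, Int.toNat_natCast,
    set_pRow N r c hc hpar]
  apply List.ext_getElem (by simp [length_pBoard])
  intro i hi1 hi2
  simp only [length_pBoard, List.length_set] at hi1 hi2 ⊢
  rw [List.getElem_set]
  simp only [pBoard, List.getElem_map, List.getElem_range]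
  rcases eq_or_ne i r with hir | hir
  · subst hir; simp
  · rw [if_neg (fun h => hir h.symm)]
    simp [hir]

lemma skip_pBoard (N r c : Nat) (hpar : (r + c) % 2 ≠ 0) :
    pBoard N r (c + 1) = pBoard N r c := by
  have hrow : pRow N r (c + 1) = pRow N r c := by
    apply List.ext_getElem (by simp [pRow])
    intro j hj1 hj2
    simp only [pRow, List.getElem_map, List.getElem_range]
    rcases eq_or_ne j c with hjc | hjc
    · subst hjc
      have h0 : parCell r j = 0 := by unfold parCell; rw [if_neg (by omega)]
      simp [h0]
    · have : j < c ↔ j < c + 1 := by omega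
      simp [this]
  simp [pBoard, hrow]

lemma advance_pBoard (N r : Nat) : pBoard N r N = pBoard N (r + 1) 0 := by
  unfold pBoard
  apply List.map_congr_left
  intro i hi
  rw [List.mem_range] at hi
  rcases lt_trichotomy i r with h | h | h
  · simp [h, Nat.lt_succ_of_lt h]
  · subst h; simp
  · rw [if_neg (by omega), if_neg (by omega), if_neg (by omega)]
    rcases eq_or_ne i (r + 1) with h1 | h1
    · rw [if_pos h1, pRow_zero]
    · rw [if_neg h1]

lemma cnt_step (N r c : Nat) :
    cnt N r (c + 1) = cnt N r c + (if (r + c) % 2 = 0 then 1 else 0) := by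
  unfold cnt; split_ifs <;> omega

lemma pred_mul_add (N : Nat) : (N - 1) * N + N = N * N := by
  cases N with
  | zero => omega
  | succ m => simp [Nat.succ_sub_one]; ring

lemma cnt_row (N r : Nat) : cnt N r N = cnt N (r + 1) 0 := by
  have hm : r * N % 2 = r % 2 * (N % 2) % 2 := Nat.mul_mod r N 2
  have hs : (r + 1) * N = r * N + N := by ring
  rcases Nat.mod_two_eq_zero_or_one r with h | h <;>
    rcases Nat.mod_two_eq_zero_or_one N with h2 | h2 <;>
    rw [h, h2] at hm <;> unfold cnt <;> split_ifs <;> omega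

lemma cnt_end (N : Nat) (hN : 1 ≤ N) : cnt N (N - 1) N = (N * N + 1) / 2 := by
  have hs : (N - 1) * N + N = N * N := pred_mul_add N
  have hm : (N - 1) * N % 2 = 0 := by
    have he : Even ((N - 1) * (N - 1 + 1)) := Nat.even_mul_succ_self (N - 1)
    rw [show N - 1 + 1 = N from by omega] at he
    exact Nat.even_iff.mp he
  unfold cnt
  rcases Nat.mod_two_eq_zero_or_one N with h2 | h2 <;> split_ifs <;> omega

lemma cnt_lt (N r c : Nat) (hr : r < N) (hc : c < N) (h : ¬(r = N - 1 ∧ c = N - 1)) :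
    cnt N r (c + 1) < (N * N + 1) / 2 := by
  rcases eq_or_ne r (N - 1) with hrN | hrN
  · subst hrN
    have hcN : c < N - 1 := by omega
    have := cnt_end N (by omega)
    unfold cnt at this ⊢
    split_ifs at this ⊢ <;> omega
  · have h1 : cnt N r (c + 1) ≤ cnt N r N := by
      unfold cnt; split_ifs <;> omega
    have h2 : cnt N r N = ((r + 1) * N + 1) / 2 := by
      rw [cnt_row]; unfold cnt; split_ifs <;> omega
    have h3 : (r + 1) * N ≤ (N - 1) * N := Nat.mul_le_mul_right N (by omega)
    have hs : (N - 1) * N + N = N * N := pred_mul_add N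
    omega

lemma maxK_cast (N : Nat) :
    PySem.Int.floordiv ((N : Int) * (N : Int) + 1) 2 = (((N * N + 1) / 2 : Nat) : Int) := by
  rw [show ((N : Int) * (N : Int) + 1) = ((N * N + 1 : Nat) : Int) by push_cast; ring,
    show (2 : Int) = ((2 : Nat) : Int) by rfl, PySem.Int.floordiv_natCast]

lemma inner_mid (N r : Nat) (hr : r + 1 < N) :
    ∀ k c, N - c = k → c ≤ N →
    gkp_inner (N : Int) (((N * N + 1) / 2 : Nat) : Int) (r : Int)
        (PySem.List.pyRange (c : Int) (N : Int) 1) (pBoard N r c) ((cnt N r c : Nat) : Int)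
      = .inr (pBoard N r N, ((cnt N r N : Nat) : Int)) := by
  intro k
  induction k with
  | zero =>
      intro c hk hc
      have hcN : c = N := by omega
      subst hcN
      rw [PySem.List.pyRange_one_eq_nil le_rfl, gkp_inner]
  | succ k ih =>
      intro c hk hc
      have hcN : c < N := by omega
      rw [PySem.List.pyRange_one_cons (by exact_mod_cast hcN),
        show ((c : Int) + 1) = ((c + 1 : Nat) : Int) by push_cast; ring,
        gkp_inner,
        show ((r : Int) + (c : Int)) = ((r + c : Nat) : Int) by push_cast; ring,
        show (2 : Int) = ((2 : Nat) : Int) by rfl,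
        PySem.Int.mod_natCast]
      have hne : ¬(r = N - 1 ∧ c = N - 1) := by omega
      by_cases hp : (r + c) % 2 = 0
      · rw [if_pos (by exact_mod_cast hp),
          valid_pBoard N r c (by omega) hcN hp, if_pos rfl,
          set_pBoard N r c (by omega) hcN hp]
        have hcnt : ((cnt N r c : Nat) : Int) + 1 = ((cnt N r (c + 1) : Nat) : Int) := by
          rw [cnt_step, if_pos hp]; push_cast; ring
        rw [hcnt, if_neg (by
          intro hEq
          have : cnt N r (c + 1) = (N * N + 1) / 2 := by exact_mod_cast hEq
          have := cnt_lt N r c (by omega) hcN hne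
          omega)]
        exact ih (c + 1) (by omega) (by omega)
      · rw [if_neg (by exact_mod_cast hp)]
        have hb : pBoard N r c = pBoard N r (c + 1) := (skip_pBoard N r c hp).symm
        have hcnt : cnt N r c = cnt N r (c + 1) := by rw [cnt_step, if_neg hp]; omega
        rw [hb, hcnt]
        exact ih (c + 1) (by omega) (by omega)

lemma inner_last (N : Nat) (hN : 1 ≤ N) :
    ∀ k c, N - c = k → c ≤ N - 1 →
    gkp_inner (N : Int) (((N * N + 1) / 2 : Nat) : Int) ((N - 1 : Nat) : Int)
        (PySem.List.pyRange (c : Int) (N : Int) 1) (pBoard N (N - 1) c) ((cnt N (N - 1) c : Nat) : Int)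
      = .inl (pBoard N (N - 1) N, (((N * N + 1) / 2 : Nat) : Int)) := by
  intro k
  induction k with
  | zero => intro c hk hc; exact absurd hk (by omega)
  | succ k ih =>
      intro c hk hc
      have hcN : c < N := by omega
      rw [PySem.List.pyRange_one_cons (by exact_mod_cast hcN),
        show ((c : Int) + 1) = ((c + 1 : Nat) : Int) by push_cast; ring,
        gkp_inner,
        show ((N - 1 : Nat) : Int) + (c : Int) = ((N - 1 + c : Nat) : Int) by push_cast; ring,
        show (2 : Int) = ((2 : Nat) : Int) by rfl,
        PySem.Int.mod_natCast]
      by_cases hp : (N - 1 + c) % 2 = 0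
      · rw [if_pos (by exact_mod_cast hp),
          valid_pBoard N (N - 1) c (by omega) hcN hp, if_pos rfl,
          set_pBoard N (N - 1) c (by omega) hcN hp]
        have hcnt : ((cnt N (N - 1) c : Nat) : Int) + 1 = ((cnt N (N - 1) (c + 1) : Nat) : Int) := by
          rw [cnt_step, if_pos hp]; push_cast; ring
        rw [hcnt]
        rcases eq_or_ne c (N - 1) with hcl | hcl
        · subst hcl
          rw [show N - 1 + 1 = N from by omega, if_pos (by rw [cnt_end N hN])]
          rw [cnt_end N hN]
        · rw [if_neg (by
            intro hEq
            have h1 : cnt N (N - 1) (c + 1) = (N * N + 1) / 2 := by exact_mod_cast hEq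
            have h2 := cnt_lt N (N - 1) c (by omega) hcN (by omega)
            omega)]
          exact ih (c + 1) (by omega) (by omega)
      · rw [if_neg (by exact_mod_cast hp)]
        have hb : pBoard N (N - 1) c = pBoard N (N - 1) (c + 1) := (skip_pBoard N (N - 1) c hp).symm
        have hcnt : cnt N (N - 1) c = cnt N (N - 1) (c + 1) := by
          rw [cnt_step, if_neg hp]; omega
        rw [hb, hcnt]
        have hcl : c ≠ N - 1 := by
          intro hEq
          subst hEq
          omega
        exact ih (c + 1) (by omega) (by omega)

lemma outer_spec (N : Nat) (hN : 1 ≤ N) :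
    ∀ k r, N - r = k → r < N →
    gkp_outer (N : Int) (((N * N + 1) / 2 : Nat) : Int)
        (PySem.List.pyRange (r : Int) (N : Int) 1) (pBoard N r 0) ((cnt N r 0 : Nat) : Int)
      = (pBoard N N 0, (((N * N + 1) / 2 : Nat) : Int)) := by
  intro k
  induction k with
  | zero => intro r hk hr; exact absurd hk (by omega)
  | succ k ih =>
      intro r hk hr
      rw [PySem.List.pyRange_one_cons (by exact_mod_cast hr),
        show ((r : Int) + 1) = ((r + 1 : Nat) : Int) by push_cast; ring,
        gkp_outer]
      by_cases hr1 : r + 1 < N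
      · have hin := inner_mid N r hr1 (N - 0) 0 rfl (by omega)
        simp only [Nat.cast_zero] at hin
        rw [hin]
        show gkp_outer _ _ _ (pBoard N r N) _ = _
        rw [advance_pBoard N r, cnt_row N r]
        exact ih (r + 1) (by omega) (by omega)
      · have hrN : r = N - 1 := by omega
        subst hrN
        have hN : 1 ≤ N := by omega
        have hin := inner_last N hN (N - 0) 0 rfl (by omega)
        simp only [Nat.cast_zero] at hin
        rw [hin]
        show (pBoard N (N - 1) N, _) = _
        rw [advance_pBoard N (N - 1), show N - 1 + 1 = N from by omega]

lemma alt_eq (N : Nat) (hN : 1 ≤ N) :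
    greedy_knight_placement_alt (N : Int) = (pBoard N N 0, (((N * N + 1) / 2 : Nat) : Int)) := by
  simp only [greedy_knight_placement_alt]
  rw [if_pos (by exact_mod_cast hN : (0 : Int) < (N : Int)), maxK_cast N]
  congr 1
  rw [PySem.List.pyRange_zero, Int.toNat_natCast, List.map_map]
  unfold pBoard
  apply List.map_congr_left
  intro i hi
  rw [List.mem_range] at hi
  simp only [Function.comp_apply]
  rw [if_pos hi, List.map_map]
  unfold pRow
  apply List.map_congr_left
  intro j hj
  rw [List.mem_range] at hj
  simp only [Function.comp_apply]
  rw [if_pos hj]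
  show 1 - PySem.Int.mod ((i : Int) + (j : Int)) 2 = parCell i j
  rw [show ((i : Int) + (j : Int)) = ((i + j : Nat) : Int) by push_cast; ring,
    show (2 : Int) = ((2 : Nat) : Int) by rfl, PySem.Int.mod_natCast]
  unfold parCell
  rcases Nat.mod_two_eq_zero_or_one (i + j) with h | h <;> rw [h] <;> simp

lemma a_eq (N : Nat) (hN : 1 ≤ N) :
    greedy_knight_placement (N : Int) = (pBoard N N 0, (((N * N + 1) / 2 : Nat) : Int)) := by
  simp only [greedy_knight_placement]
  rw [maxK_cast N]
  have hboard : (PySem.List.pyRange 0 (N : Int) 1).map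
      (fun _ => List.replicate ((N : Int)).toNat (0 : Int)) = pBoard N 0 0 := by
    rw [PySem.List.pyRange_zero, Int.toNat_natCast, List.map_map]
    unfold pBoard
    apply List.map_congr_left
    intro i hi
    rw [List.mem_range] at hi
    simp only [Function.comp_apply]
    rcases eq_or_ne i 0 with h | h
    · subst h
      simp [pRow_zero]
    · rw [if_neg (by omega), if_neg h]
  rw [hboard]
  have h := outer_spec N hN N 0 (by omega) (by omega)
  rw [show cnt N 0 0 = 0 from by simp [cnt]] at h
  push_cast at h ⊢
  exact h

-- ===== VERDICT (by name: the statement is the Claim_ definition above) =====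
theorem greedy_knight_placement_spec : Claim_equal_greedy_knight_placement := by
  unfold Claim_equal_greedy_knight_placement
  intro n _
  unfold Spec_greedy_knight_placement
  by_cases hn : 0 < n
  · obtain ⟨N, rfl⟩ : ∃ N : Nat, n = (N : Int) :=
      ⟨n.toNat, (Int.toNat_of_nonneg (by omega)).symm⟩
    have hN : 1 ≤ N := by exact_mod_cast hn
    rw [a_eq N hN, alt_eq N hN]
  · have h0 : PySem.List.pyRange 0 n 1 = [] := PySem.List.pyRange_one_eq_nil (by omega)
    simp only [greedy_knight_placement, greedy_knight_placement_alt, h0, List.map_nil, gkp_outer]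
    rw [if_neg hn]
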